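-- pv_equiv track=rewrite | github.com/tuanvule/coganh | trainAI/Master2.py | CheckGamepoint_1
-- ===== SOURCE A (Python) =====
-- def CheckGamepoint_1(set_your_pos, set_opp_pos, depth=0):
--     def expand(set_your_pos, set_opp_pos):
--         new_pos = set_your_pos - {None}
--         for pos in set_your_pos:
--             if (pos[0]+pos[1])%2==0:
--                 move_list = ((1,0), (-1,0), (0,1), (0,-1), (1,1), (-1,-1), (-1,1), (1,-1))
--             else:
--                 move_list = ((1,0), (-1,0), (0,1), (0,-1))
--             for move in move_list:
--                 new_x = pos[0] + move[0]
--                 new_y = pos[1] + move[1]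
--                 if 0<=new_x<=4 and 0<=new_y<=4:
--                     new_pos.add((new_x, new_y))
--         return new_pos - set_opp_pos
--
--     if depth == 4:
--         return (len(set_your_pos) - len(set_opp_pos))
--
--     set_your_pos, set_opp_pos = expand(set_your_pos, set_opp_pos), expand(set_opp_pos, set_your_pos)
--
--     return CheckGamepoint_1(set_your_pos - set_opp_pos, set_opp_pos - set_your_pos, depth+1)
-- ===== SOURCE B (Python) =====
-- def CheckGamepoint_1(set_your_pos, set_opp_pos, depth=0):
--     # Board-scan reachability: instead of flooding move targets outward from each
--     # occupied cell, test each of the 25 board cells against its (symmetric)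
--     # neighbourhood; an iterative while-loop replaces the recursion.
--     def grow(mine):
--         out = {p for p in mine if p is not None}
--         for x in range(5):
--             for y in range(5):
--                 if (x + y) % 2 == 0:
--                     deltas = ((1,0), (-1,0), (0,1), (0,-1), (1,1), (-1,-1), (-1,1), (1,-1))
--                 else:
--                     deltas = ((1,0), (-1,0), (0,1), (0,-1))
--                 if any((x + dx, y + dy) in mine for dx, dy in deltas):
--                     out.add((x, y))
--         return out
--
--     while depth != 4:
--         a = grow(set_your_pos) - set_opp_pos
--         b = grow(set_opp_pos) - set_your_pos
--         set_your_pos, set_opp_pos = a - b, b - a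
--         depth += 1
--     return len(set_your_pos) - len(set_opp_pos)
-- ===== Notes on version B (the rewrite author's own statement) =====
-- stated objective: alternative
-- what changed: The tail recursion over depth becomes an iterative while-loop, and the expansion step is inverted: instead of flooding move targets outward from every occupied cell, B scans the 25 board cells once per round and admits a cell when it is occupied or some neighbour of it (the adjacency is symmetric) is occupied.
-- outside the precondition, e.g. on CheckGamepoint_1({(0, 0)}, set(), -601): A returns 25, B returns 25
import Mathlib
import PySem

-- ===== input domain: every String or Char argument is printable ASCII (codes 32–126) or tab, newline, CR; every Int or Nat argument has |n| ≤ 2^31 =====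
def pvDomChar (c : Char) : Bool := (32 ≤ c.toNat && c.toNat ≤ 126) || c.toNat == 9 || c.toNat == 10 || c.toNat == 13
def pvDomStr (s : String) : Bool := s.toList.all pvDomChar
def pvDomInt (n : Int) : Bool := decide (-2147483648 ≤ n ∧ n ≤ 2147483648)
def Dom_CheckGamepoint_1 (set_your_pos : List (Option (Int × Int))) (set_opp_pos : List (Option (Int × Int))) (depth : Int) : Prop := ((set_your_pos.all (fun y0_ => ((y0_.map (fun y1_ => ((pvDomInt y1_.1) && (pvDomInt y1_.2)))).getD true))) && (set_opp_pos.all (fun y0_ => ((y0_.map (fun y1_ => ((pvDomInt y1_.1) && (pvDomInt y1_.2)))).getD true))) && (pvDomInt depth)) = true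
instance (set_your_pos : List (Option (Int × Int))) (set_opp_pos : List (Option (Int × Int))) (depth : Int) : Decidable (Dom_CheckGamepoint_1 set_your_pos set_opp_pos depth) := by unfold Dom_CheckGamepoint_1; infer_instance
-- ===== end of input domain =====

-- B replaces A's recursive flood-from-occupied-cells expansion by an iterative round loop whose
-- expansion scans the 25 board cells and tests each cell's (symmetric) neighbourhood for occupancy.


-- ===== PORT A =====
-- A's move_list tuples and its `if (pos[0]+pos[1])%2==0` choice between them
def pvMovesA8 : List (Int × Int) := [(1,0), (-1,0), (0,1), (0,-1), (1,1), (-1,-1), (-1,1), (1,-1)]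
def pvMovesA4 : List (Int × Int) := [(1,0), (-1,0), (0,1), (0,-1)]
def pvML (x y : Int) : List (Int × Int) :=
  if PySem.Int.mod (x + y) 2 = 0 then pvMovesA8 else pvMovesA4

-- A's inner `for move in move_list` body
def pvInnerA (px py : Int) (np : PySem.Set (Option (Int × Int))) (mv : Int × Int) : PySem.Set (Option (Int × Int)) :=
  let nx := px + mv.1
  let ny := py + mv.2
  if 0 ≤ nx ∧ nx ≤ 4 ∧ 0 ≤ ny ∧ ny ≤ 4 then PySem.Set.add np (some (nx, ny)) else np

-- A's `for pos in set_your_pos` body (Python raises TypeError on a None pos; Pre_ keeps None out of iterated sets)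
def pvStepA (np : PySem.Set (Option (Int × Int))) (pos : Option (Int × Int)) : PySem.Set (Option (Int × Int)) :=
  match pos with
  | none => np
  | some (px, py) => (pvML px py).foldl (pvInnerA px py) np

-- A's inner `expand(set_your_pos, set_opp_pos)`
def pvExpandA (syp sop : PySem.Set (Option (Int × Int))) : PySem.Set (Option (Int × Int)) :=
  PySem.Set.diff (syp.foldl pvStepA (PySem.Set.diff syp (PySem.Set.ofList [none]))) sop

def CheckGamepoint_1 (set_your_pos : List (Option (Int × Int))) (set_opp_pos : List (Option (Int × Int))) (depth : Int) : Int :=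
  if depth = 4 then (set_your_pos.length : Int) - (set_opp_pos.length : Int)
  else if 4 < depth then 0   -- totality guard only: the Python recursion never returns here (outside Pre_)
  else
    let e1 := pvExpandA set_your_pos set_opp_pos
    let e2 := pvExpandA set_opp_pos set_your_pos
    CheckGamepoint_1 (PySem.Set.diff e1 e2) (PySem.Set.diff e2 e1) (depth + 1)
termination_by (4 - depth).toNat
decreasing_by omega

-- ===== PORT B =====
-- B's delta tuples and its parity choice
def pvDeltasB8 : List (Int × Int) := [(1,0), (-1,0), (0,1), (0,-1), (1,1), (-1,-1), (-1,1), (1,-1)]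
def pvDeltasB4 : List (Int × Int) := [(1,0), (-1,0), (0,1), (0,-1)]
def pvDL (x y : Int) : List (Int × Int) :=
  if PySem.Int.mod (x + y) 2 = 0 then pvDeltasB8 else pvDeltasB4

-- B's per-cell test: add (x,y) when some neighbour of it lies in `mine`
def pvCellB (mine : PySem.Set (Option (Int × Int))) (x : Int) (out : PySem.Set (Option (Int × Int))) (y : Int) : PySem.Set (Option (Int × Int)) :=
  let deltas := pvDL x y
  if deltas.any (fun d => PySem.Set.contains mine (some (x + d.1, y + d.2)))
  then PySem.Set.add out (some (x, y)) else out

-- B's `for y in range(5)` row scan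
def pvRowB (mine : PySem.Set (Option (Int × Int))) (out : PySem.Set (Option (Int × Int))) (x : Int) : PySem.Set (Option (Int × Int)) :=
  (PySem.List.pyRange 0 5 1).foldl (pvCellB mine x) out

-- B's `grow(mine)`: the non-None occupants plus every board cell with an occupied neighbour
def pvGrowB (mine : PySem.Set (Option (Int × Int))) : PySem.Set (Option (Int × Int)) :=
  (PySem.List.pyRange 0 5 1).foldl (pvRowB mine) (PySem.Set.ofList (mine.filter (fun p => p ≠ none)))

-- B's `while depth != 4` loop, with fuel (4 - depth).toNat: exactly the number of iterations
-- after which the guard fails, so the 0-fuel/guard-still-true case (Python loops forever, depth > 4,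
-- outside Pre_) is unreachable whenever the Python loop exits
def pvLoopB (fuel : Nat) (syp sop : PySem.Set (Option (Int × Int))) (depth : Int) : Int :=
  if depth = 4 then (syp.length : Int) - (sop.length : Int)
  else
    match fuel with
    | 0 => 0
    | k + 1 =>
      let a := PySem.Set.diff (pvGrowB syp) sop
      let b := PySem.Set.diff (pvGrowB sop) syp
      pvLoopB k (PySem.Set.diff a b) (PySem.Set.diff b a) (depth + 1)

def CheckGamepoint_1_alt (set_your_pos : List (Option (Int × Int))) (set_opp_pos : List (Option (Int × Int))) (depth : Int) : Int :=
  pvLoopB (4 - depth).toNat set_your_pos set_opp_pos depth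

-- ===== PRECONDITION & SPEC =====
-- Pre_ excludes: duplicate-bearing lists (the arguments are Python sets); depth > 4 (A's recursion
-- never reaches 4, so it never returns); None elements when depth < 4 (A raises TypeError on
-- pos[0]); and depth < -600, where A's recursion (4 - depth frames deep) approaches CPython's
-- default recursion limit and whether A returns depends on the interpreter (RecursionError).
def Pre_CheckGamepoint_1 (set_your_pos : List (Option (Int × Int))) (set_opp_pos : List (Option (Int × Int))) (depth : Int) : Prop :=
  set_your_pos.Nodup ∧ set_opp_pos.Nodup ∧
    (depth = 4 ∨ (-600 ≤ depth ∧ depth < 4 ∧ none ∉ set_your_pos ∧ none ∉ set_opp_pos))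
instance (set_your_pos : List (Option (Int × Int))) (set_opp_pos : List (Option (Int × Int))) (depth : Int) : Decidable (Pre_CheckGamepoint_1 set_your_pos set_opp_pos depth) := by unfold Pre_CheckGamepoint_1; infer_instance

def pvWitness_CheckGamepoint_1 : (List (Option (Int × Int))) × (List (Option (Int × Int))) × Int :=
  ([some (0, 0), some (2, 2)], [some (4, 4)], 0)

def Spec_CheckGamepoint_1 (set_your_pos : List (Option (Int × Int))) (set_opp_pos : List (Option (Int × Int))) (depth : Int) (out : Int) : Prop := out = CheckGamepoint_1_alt set_your_pos set_opp_pos depth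
instance (set_your_pos : List (Option (Int × Int))) (set_opp_pos : List (Option (Int × Int))) (depth : Int) (out : Int) : Decidable (Spec_CheckGamepoint_1 set_your_pos set_opp_pos depth out) := by unfold Spec_CheckGamepoint_1; infer_instance

-- ===== CLAIM =====
def Claim_equal_CheckGamepoint_1 : Prop := ∀ (set_your_pos : List (Option (Int × Int))) (set_opp_pos : List (Option (Int × Int))) (depth : Int), Dom_CheckGamepoint_1 set_your_pos set_opp_pos depth → Pre_CheckGamepoint_1 set_your_pos set_opp_pos depth → Spec_CheckGamepoint_1 set_your_pos set_opp_pos depth (CheckGamepoint_1 set_your_pos set_opp_pos depth)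

-- ===== LEMMAS AND PROOFS =====

lemma pv_dl_eq_ml (x y : Int) : pvDL x y = pvML x y := by
  unfold pvDL pvML pvDeltasB8 pvDeltasB4 pvMovesA8 pvMovesA4; rfl

-- the cell-to-cell move relation of both programs, as plain arithmetic
lemma pv_adj_char (px py cx cy : Int) :
    (∃ mv ∈ pvML px py, cx = px + mv.1 ∧ cy = py + mv.2) ↔
    (((cx = px + 1 ∨ cx = px - 1) ∧ cy = py) ∨ (cx = px ∧ (cy = py + 1 ∨ cy = py - 1)) ∨
      ((px + py) % 2 = 0 ∧ (cx = px + 1 ∨ cx = px - 1) ∧ (cy = py + 1 ∨ cy = py - 1))) := by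
  have h1 : PySem.Int.mod (px + py) 2 = (px + py) % 2 := PySem.Int.mod_eq_emod_of_pos (by omega)
  unfold pvML
  rw [h1]
  split_ifs with hp <;> simp [pvMovesA8, pvMovesA4] <;> omega

-- adjacency is symmetric: a move from p to c corresponds to a move from c back to p
lemma pv_adj_symm (px py cx cy : Int) :
    (∃ mv ∈ pvML px py, cx = px + mv.1 ∧ cy = py + mv.2) ↔
    (∃ mv ∈ pvML cx cy, px = cx + mv.1 ∧ py = cy + mv.2) := by
  rw [pv_adj_char, pv_adj_char]
  omega

lemma pv_mem_innerA_fold (px py : Int) (ml : List (Int × Int)) :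
    ∀ (np : PySem.Set (Option (Int × Int))) (x : Option (Int × Int)),
    x ∈ ml.foldl (pvInnerA px py) np ↔ x ∈ np ∨ ∃ mv ∈ ml,
      x = some (px + mv.1, py + mv.2) ∧ 0 ≤ px + mv.1 ∧ px + mv.1 ≤ 4 ∧ 0 ≤ py + mv.2 ∧ py + mv.2 ≤ 4 := by
  induction ml with
  | nil => simp
  | cons mv ml ih =>
    intro np x
    simp only [List.foldl_cons, ih, List.mem_cons]
    unfold pvInnerA
    dsimp only
    split_ifs with h
    · rw [PySem.Set.mem_add]
      constructor
      · rintro ((h1 | h1) | h1)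
        · exact Or.inl h1
        · exact Or.inr ⟨mv, Or.inl rfl, h1, h⟩
        · obtain ⟨m, hm, h2⟩ := h1; exact Or.inr ⟨m, Or.inr hm, h2⟩
      · rintro (h1 | ⟨m, (rfl | hm), h2⟩)
        · exact Or.inl (Or.inl h1)
        · exact Or.inl (Or.inr h2.1)
        · exact Or.inr ⟨m, hm, h2⟩
    · constructor
      · rintro (h1 | ⟨m, hm, h2⟩)
        · exact Or.inl h1
        · exact Or.inr ⟨m, Or.inr hm, h2⟩
      · rintro (h1 | ⟨m, (rfl | hm), h2⟩)
        · exact Or.inl h1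
        · exact absurd ⟨h2.2.1, h2.2.2.1, h2.2.2.2⟩ h
        · exact Or.inr ⟨m, hm, h2⟩

lemma pv_mem_stepA_fold (ps : List (Option (Int × Int))) :
    ∀ (np : PySem.Set (Option (Int × Int))) (x : Option (Int × Int)),
    x ∈ ps.foldl pvStepA np ↔ x ∈ np ∨ ∃ px py, some (px, py) ∈ ps ∧ ∃ mv ∈ pvML px py,
      x = some (px + mv.1, py + mv.2) ∧ 0 ≤ px + mv.1 ∧ px + mv.1 ≤ 4 ∧ 0 ≤ py + mv.2 ∧ py + mv.2 ≤ 4 := by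
  induction ps with
  | nil => simp
  | cons p ps ih =>
    intro np x
    simp only [List.foldl_cons, ih, List.mem_cons]
    match p with
    | none =>
      show x ∈ np ∨ _ ↔ _
      constructor
      · rintro (h1 | ⟨px, py, hp, h2⟩)
        · exact Or.inl h1
        · exact Or.inr ⟨px, py, Or.inr hp, h2⟩
      · rintro (h1 | ⟨px, py, (hp | hp), h2⟩)
        · exact Or.inl h1
        · exact absurd hp (by simp)
        · exact Or.inr ⟨px, py, hp, h2⟩
    | some (a, b) =>
      show x ∈ (pvML a b).foldl (pvInnerA a b) np ∨ _ ↔ _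
      rw [pv_mem_innerA_fold]
      constructor
      · rintro ((h1 | ⟨m, hm, h2⟩) | ⟨px, py, hp, h2⟩)
        · exact Or.inl h1
        · exact Or.inr ⟨a, b, Or.inl rfl, m, hm, h2⟩
        · exact Or.inr ⟨px, py, Or.inr hp, h2⟩
      · rintro (h1 | ⟨px, py, (hp | hp), h2⟩)
        · exact Or.inl (Or.inl h1)
        · obtain ⟨rfl, rfl⟩ : px = a ∧ py = b := by simpa using hp
          exact Or.inl (Or.inr h2)
        · exact Or.inr ⟨px, py, hp, h2⟩

lemma pv_mem_expandA (s o : PySem.Set (Option (Int × Int))) (x : Option (Int × Int)) :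
    x ∈ pvExpandA s o ↔
      ((x ∈ s ∧ x ≠ none) ∨
        ∃ px py, some (px, py) ∈ s ∧ ∃ mv ∈ pvML px py,
          x = some (px + mv.1, py + mv.2) ∧ 0 ≤ px + mv.1 ∧ px + mv.1 ≤ 4 ∧ 0 ≤ py + mv.2 ∧ py + mv.2 ≤ 4) ∧
      x ∉ o := by
  unfold pvExpandA
  rw [PySem.Set.mem_diff, pv_mem_stepA_fold, PySem.Set.mem_diff, PySem.Set.mem_ofList]
  simp

lemma pv_nodup_innerA_fold (px py : Int) (ml : List (Int × Int)) :
    ∀ (np : PySem.Set (Option (Int × Int))), np.Nodup → (ml.foldl (pvInnerA px py) np).Nodup := by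
  induction ml with
  | nil => intro np h; exact h
  | cons mv ml ih =>
    intro np h
    refine ih _ ?_
    unfold pvInnerA
    dsimp only
    split_ifs
    · exact PySem.Set.nodup_add _ _ h
    · exact h

lemma pv_nodup_stepA_fold (ps : List (Option (Int × Int))) :
    ∀ (np : PySem.Set (Option (Int × Int))), np.Nodup → (ps.foldl pvStepA np).Nodup := by
  induction ps with
  | nil => intro np h; exact h
  | cons p ps ih =>
    intro np h
    refine ih _ ?_
    match p with
    | none => exact h
    | some (a, b) => exact pv_nodup_innerA_fold a b _ _ h

lemma pv_nodup_expandA (s o : PySem.Set (Option (Int × Int))) (h : s.Nodup) :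
    (pvExpandA s o).Nodup :=
  PySem.Set.nodup_diff _ _ (pv_nodup_stepA_fold _ _ (PySem.Set.nodup_diff _ _ h))

lemma pv_mem_cellB_fold (mine : PySem.Set (Option (Int × Int))) (cx : Int) (ys : List Int) :
    ∀ (out : PySem.Set (Option (Int × Int))) (x : Option (Int × Int)),
    x ∈ ys.foldl (pvCellB mine cx) out ↔ x ∈ out ∨ ∃ cy ∈ ys, x = some (cx, cy) ∧
      ∃ mv ∈ pvDL cx cy, some (cx + mv.1, cy + mv.2) ∈ mine := by
  induction ys with
  | nil => simp
  | cons cy ys ih =>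
    intro out x
    simp only [List.foldl_cons, ih, List.mem_cons]
    unfold pvCellB
    dsimp only
    split_ifs with h
    · rw [PySem.Set.mem_add]
      rw [List.any_eq_true] at h
      obtain ⟨d, hd, hc⟩ := h
      rw [PySem.Set.contains_iff] at hc
      constructor
      · rintro ((h1 | h1) | ⟨c, hc', h2⟩)
        · exact Or.inl h1
        · exact Or.inr ⟨cy, Or.inl rfl, h1, d, hd, hc⟩
        · exact Or.inr ⟨c, Or.inr hc', h2⟩
      · rintro (h1 | ⟨c, (rfl | hc'), h2⟩)
        · exact Or.inl (Or.inl h1)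
        · exact Or.inl (Or.inr h2.1)
        · exact Or.inr ⟨c, hc', h2⟩
    · constructor
      · rintro (h1 | ⟨c, hc', h2⟩)
        · exact Or.inl h1
        · exact Or.inr ⟨c, Or.inr hc', h2⟩
      · rintro (h1 | ⟨c, (rfl | hc'), h2⟩)
        · exact Or.inl h1
        · obtain ⟨_, m, hm, hmem⟩ := h2
          refine absurd ?_ h
          rw [List.any_eq_true]
          exact ⟨m, hm, by rw [PySem.Set.contains_iff]; exact hmem⟩
        · exact Or.inr ⟨c, hc', h2⟩

lemma pv_mem_rowB_fold (mine : PySem.Set (Option (Int × Int))) (xs : List Int) :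
    ∀ (out : PySem.Set (Option (Int × Int))) (x : Option (Int × Int)),
    x ∈ xs.foldl (pvRowB mine) out ↔ x ∈ out ∨ ∃ cx ∈ xs, ∃ cy ∈ PySem.List.pyRange 0 5 1, x = some (cx, cy) ∧
      ∃ mv ∈ pvDL cx cy, some (cx + mv.1, cy + mv.2) ∈ mine := by
  induction xs with
  | nil => simp
  | cons cx xs ih =>
    intro out x
    simp only [List.foldl_cons, ih, List.mem_cons]
    unfold pvRowB
    rw [pv_mem_cellB_fold]
    constructor
    · rintro ((h1 | h1) | ⟨c, hc, h2⟩)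
      · exact Or.inl h1
      · obtain ⟨cy, hcy, h2⟩ := h1; exact Or.inr ⟨cx, Or.inl rfl, cy, hcy, h2⟩
      · exact Or.inr ⟨c, Or.inr hc, h2⟩
    · rintro (h1 | ⟨c, (rfl | hc), h2⟩)
      · exact Or.inl (Or.inl h1)
      · obtain ⟨cy, hcy, h2⟩ := h2; exact Or.inl (Or.inr ⟨cy, hcy, h2⟩)
      · exact Or.inr ⟨c, hc, h2⟩

lemma pv_mem_growB (s : PySem.Set (Option (Int × Int))) (x : Option (Int × Int)) :
    x ∈ pvGrowB s ↔
      (x ∈ s ∧ x ≠ none) ∨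
        ∃ cx cy, 0 ≤ cx ∧ cx ≤ 4 ∧ 0 ≤ cy ∧ cy ≤ 4 ∧ x = some (cx, cy) ∧
          ∃ mv ∈ pvDL cx cy, some (cx + mv.1, cy + mv.2) ∈ s := by
  unfold pvGrowB
  rw [pv_mem_rowB_fold, PySem.Set.mem_ofList]
  have hr : PySem.List.pyRange 0 5 1 = [0, 1, 2, 3, 4] := by decide
  rw [hr]
  simp only [List.mem_filter, List.mem_cons, List.not_mem_nil, or_false]
  constructor
  · rintro (⟨h1, h2⟩ | ⟨cx, hcx, cy, hcy, h2⟩)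
    · exact Or.inl ⟨h1, by simpa using h2⟩
    · exact Or.inr ⟨cx, cy, by omega, by omega, by omega, by omega, h2⟩
  · rintro (⟨h1, h2⟩ | ⟨cx, cy, h1, h2, h3, h4, h5⟩)
    · exact Or.inl ⟨h1, by simpa using h2⟩
    · exact Or.inr ⟨cx, by omega, cy, by omega, h5⟩

lemma pv_nodup_cellB_fold (mine : PySem.Set (Option (Int × Int))) (cx : Int) (ys : List Int) :
    ∀ (out : PySem.Set (Option (Int × Int))), out.Nodup → (ys.foldl (pvCellB mine cx) out).Nodup := by
  induction ys with
  | nil => intro out h; exact h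
  | cons cy ys ih =>
    intro out h
    refine ih _ ?_
    unfold pvCellB
    dsimp only
    split_ifs
    · exact PySem.Set.nodup_add _ _ h
    · exact h

lemma pv_nodup_rowB_fold (mine : PySem.Set (Option (Int × Int))) (xs : List Int) :
    ∀ (out : PySem.Set (Option (Int × Int))), out.Nodup → (xs.foldl (pvRowB mine) out).Nodup := by
  induction xs with
  | nil => intro out h; exact h
  | cons cx xs ih =>
    intro out h
    exact ih _ (pv_nodup_cellB_fold mine cx _ _ h)

lemma pv_nodup_growB (s : PySem.Set (Option (Int × Int))) : (pvGrowB s).Nodup :=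
  pv_nodup_rowB_fold _ _ _ (PySem.Set.nodup_ofList _)

-- one expansion round of A and one of B produce the same set of positions
lemma pv_round_mem (s1 o1 s2 o2 : PySem.Set (Option (Int × Int)))
    (hs : ∀ x, x ∈ s1 ↔ x ∈ s2) (ho : ∀ x, x ∈ o1 ↔ x ∈ o2) (x : Option (Int × Int)) :
    x ∈ pvExpandA s1 o1 ↔ x ∈ PySem.Set.diff (pvGrowB s2) o2 := by
  rw [pv_mem_expandA, PySem.Set.mem_diff, pv_mem_growB]
  refine and_congr (or_congr (and_congr_left fun _ => hs x) ?_) (not_congr (ho x))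
  constructor
  · rintro ⟨px, py, hp, mv, hmv, hx, b1, b2, b3, b4⟩
    obtain ⟨mv', hmv', h1, h2⟩ := (pv_adj_symm px py (px + mv.1) (py + mv.2)).1 ⟨mv, hmv, rfl, rfl⟩
    refine ⟨px + mv.1, py + mv.2, b1, b2, b3, b4, hx, mv', by rw [pv_dl_eq_ml]; exact hmv', ?_⟩
    rw [← h1, ← h2]
    exact (hs _).1 hp
  · rintro ⟨cx, cy, b1, b2, b3, b4, hx, mv, hmv, hmem⟩
    rw [pv_dl_eq_ml] at hmv
    obtain ⟨mv', hmv', h1, h2⟩ := (pv_adj_symm cx cy (cx + mv.1) (cy + mv.2)).1 ⟨mv, hmv, rfl, rfl⟩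
    refine ⟨cx + mv.1, cy + mv.2, (hs _).2 hmem, mv', hmv', ?_, by omega, by omega, by omega, by omega⟩
    rw [← h1, ← h2]
    exact hx

-- the main induction: A's recursion and B's loop agree round for round
lemma pv_loop_eq (k : Nat) : ∀ (s1 o1 s2 o2 : PySem.Set (Option (Int × Int))) (depth : Int),
    depth = 4 - (k : Int) →
    s1.Nodup → o1.Nodup → s2.Nodup → o2.Nodup →
    (∀ x, x ∈ s1 ↔ x ∈ s2) → (∀ x, x ∈ o1 ↔ x ∈ o2) →
    CheckGamepoint_1 s1 o1 depth = pvLoopB k s2 o2 depth := by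
  induction k with
  | zero =>
    intro s1 o1 s2 o2 depth hd n1 n2 n3 n4 hs ho
    have h4 : depth = 4 := by omega
    rw [CheckGamepoint_1, pvLoopB, if_pos h4, if_pos h4]
    have e1 : s1.length = s2.length :=
      ((List.perm_ext_iff_of_nodup n1 n3).2 hs).length_eq
    have e2 : o1.length = o2.length :=
      ((List.perm_ext_iff_of_nodup n2 n4).2 ho).length_eq
    rw [e1, e2]
  | succ k ih =>
    intro s1 o1 s2 o2 depth hd n1 n2 n3 n4 hs ho
    have hne : depth ≠ 4 := by omega
    have hlt : ¬ 4 < depth := by omega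
    rw [CheckGamepoint_1, pvLoopB, if_neg hne, if_neg hne, if_neg hlt]
    have hE1 : ∀ x, x ∈ pvExpandA s1 o1 ↔ x ∈ PySem.Set.diff (pvGrowB s2) o2 :=
      pv_round_mem s1 o1 s2 o2 hs ho
    have hE2 : ∀ x, x ∈ pvExpandA o1 s1 ↔ x ∈ PySem.Set.diff (pvGrowB o2) s2 :=
      pv_round_mem o1 s1 o2 s2 ho hs
    refine ih _ _ _ _ _ (by omega)
      (PySem.Set.nodup_diff _ _ (pv_nodup_expandA _ _ n1))
      (PySem.Set.nodup_diff _ _ (pv_nodup_expandA _ _ n2))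
      (PySem.Set.nodup_diff _ _ (PySem.Set.nodup_diff _ _ (pv_nodup_growB _)))
      (PySem.Set.nodup_diff _ _ (PySem.Set.nodup_diff _ _ (pv_nodup_growB _)))
      (fun x => ?_) (fun x => ?_)
    · rw [PySem.Set.mem_diff, PySem.Set.mem_diff, hE1 x, hE2 x]
    · rw [PySem.Set.mem_diff, PySem.Set.mem_diff, hE1 x, hE2 x]

-- ===== VERDICT =====
theorem CheckGamepoint_1_spec : Claim_equal_CheckGamepoint_1 := by
  intro syp sop depth _ hpre
  unfold Spec_CheckGamepoint_1 CheckGamepoint_1_alt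
  obtain ⟨h1, h2, hd⟩ := hpre
  have hk : depth = 4 - ((4 - depth).toNat : Int) := by omega
  exact pv_loop_eq (4 - depth).toNat syp sop syp sop depth hk h1 h2 h1 h2
    (fun _ => Iff.rfl) (fun _ => Iff.rfl)
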